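-- pv_equiv track=rewrite | github.com/tengfone/deadtext | scenario_generator.py | _format_telegram_markdown
-- ===== SOURCE A (Python) =====
-- def _format_telegram_markdown(text: str) -> str:
--     """Format text with Telegram markdown v2 styling."""
--     # Split text into sections
--     sections = text.split("[")
--     if len(sections) <= 1:
--         return text
--
--     formatted_text = sections[0]  # Keep any text before first section
--     for section in sections[1:]:
--         if "]" not in section:
--             formatted_text += "[" + section
--             continue
--
--         header, content = section.split("]", 1)
--         # Format section header in bold
--         formatted_text += f"*{header}*\n{content.strip()}\n"
--
--     return formatted_text.strip()
-- ===== SOURCE B (Python) =====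
-- def _format_telegram_markdown(text: str) -> str:
--     """Format text with Telegram markdown v2 styling.
--
--     Single-pass character-level state machine: state 0 copies text before/outside
--     sections, state 1 collects a section header until ']', state 2 collects the
--     section content until the next '['.  No splitting, no per-section membership
--     test: each character is examined exactly once.
--     """
--     if "[" not in text:
--         return text
--     out = []
--     state = 0  # 0 = plain text, 1 = inside header, 2 = inside content
--     buf = []
--     for ch in text:
--         if state == 0:
--             if ch == "[":
--                 state, buf = 1, []
--             else:
--                 out.append(ch)
--         elif state == 1:
--             if ch == "]":
--                 out.append("*" + "".join(buf) + "*\n")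
--                 state, buf = 2, []
--             elif ch == "[":
--                 out.append("[" + "".join(buf))  # bracketless leftover, kept verbatim
--                 buf = []
--             else:
--                 buf.append(ch)
--         else:  # state == 2
--             if ch == "[":
--                 out.append("".join(buf).strip() + "\n")
--                 state, buf = 1, []
--             else:
--                 buf.append(ch)
--     if state == 1:
--         out.append("[" + "".join(buf))
--     elif state == 2:
--         out.append("".join(buf).strip() + "\n")
--     return "".join(out).strip()
-- ===== Notes on version B (the rewrite author's own statement) =====
-- stated objective: alternative
-- what changed: Replaces A's split-on-'[' list plus per-section membership-test-and-split(']',1) parsing by a single left-to-right character-level state machine with three states (plain text / header / content) that examines each character exactly once.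
import Mathlib
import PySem

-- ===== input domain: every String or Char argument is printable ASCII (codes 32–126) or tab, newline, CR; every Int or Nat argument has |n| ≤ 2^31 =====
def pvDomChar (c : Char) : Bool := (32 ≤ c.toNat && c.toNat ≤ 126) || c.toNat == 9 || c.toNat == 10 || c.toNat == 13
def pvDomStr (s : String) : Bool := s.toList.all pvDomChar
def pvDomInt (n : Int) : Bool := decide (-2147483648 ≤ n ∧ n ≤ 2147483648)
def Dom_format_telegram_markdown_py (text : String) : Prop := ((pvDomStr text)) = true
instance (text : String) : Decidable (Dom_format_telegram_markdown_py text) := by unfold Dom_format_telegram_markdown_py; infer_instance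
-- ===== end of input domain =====

-- B replaces A's split-into-list-then-loop parser by a single-pass three-state
-- character-level state machine (objective: alternative, same cost).


-- ===== PORT A =====
-- body of A's 'for section in sections[1:]' loop
def pvA_fmt (acc : List Char) (sec : List Char) : List Char :=
  if PySem.Chars.isIn [']'] sec = false then acc ++ '[' :: sec
  else
    let parts := PySem.Chars.splitOnMax sec [']'] 1
    let header := parts.getD 0 []
    let content := parts.getD 1 []
    acc ++ '*' :: (header ++ '*' :: '\n' :: (PySem.Chars.strip content ++ ['\n']))

def format_telegram_markdown_py (text : String) : String :=
  let sections := PySem.Chars.splitOn text.toList ['[']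
  if sections.length ≤ 1 then text
  else
    let formatted := (sections.drop 1).foldl pvA_fmt (sections.headD [])
    String.ofList (PySem.Chars.strip formatted)

-- ===== PORT B =====
-- one step of B's state machine: state 0 = plain text, 1 = header, 2 = content
def pvStep (s : List Char × Nat × List Char) (ch : Char) : List Char × Nat × List Char :=
  match s with
  | (out, st, buf) =>
    if st = 0 then
      if ch = '[' then (out, 1, [])
      else (out ++ [ch], 0, buf)
    else if st = 1 then
      if ch = ']' then (out ++ '*' :: buf ++ ['*', '\n'], 2, [])
      else if ch = '[' then (out ++ '[' :: buf, 1, [])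
      else (out, 1, buf ++ [ch])
    else
      if ch = '[' then (out ++ PySem.Chars.strip buf ++ ['\n'], 1, [])
      else (out, 2, buf ++ [ch])

-- B's flush of the final state after the loop
def pvFinish (s : List Char × Nat × List Char) : List Char :=
  match s with
  | (out, st, buf) =>
    if st = 1 then out ++ '[' :: buf
    else if st = 2 then out ++ PySem.Chars.strip buf ++ ['\n']
    else out

def format_telegram_markdown_py_alt (text : String) : String :=
  if PySem.Chars.isIn ['['] text.toList = false then text
  else
    String.ofList (PySem.Chars.strip (pvFinish (text.toList.foldl pvStep ([], 0, []))))

-- ===== PRECONDITION & SPEC =====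
def Spec_format_telegram_markdown_py (text : String) (out : String) : Prop := out = format_telegram_markdown_py_alt text
instance (text : String) (out : String) : Decidable (Spec_format_telegram_markdown_py text out) := by unfold Spec_format_telegram_markdown_py; infer_instance

-- ===== CLAIM (what is proved, stated in full; the proofs are below) =====
def Claim_equal_format_telegram_markdown_py : Prop := ∀ (text : String), Dom_format_telegram_markdown_py text → Spec_format_telegram_markdown_py text (format_telegram_markdown_py text)

-- ===== LEMMAS AND PROOFS =====

-- (head before the first c, rest after it); none when c is absent
def pvPartition (s : List Char) (c : Char) : Option (List Char × List Char) :=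
  match s with
  | [] => none
  | x :: xs => if x = c then some ([], xs) else (pvPartition xs c).map (fun p => (x :: p.1, p.2))

theorem pvPartition_some_length {s : List Char} {c : Char} {a b : List Char}
    (h : pvPartition s c = some (a, b)) : b.length < s.length := by
  induction s generalizing a b with
  | nil => simp [pvPartition] at h
  | cons x xs ih =>
    by_cases hx : x = c
    · simp [pvPartition, hx] at h
      simp [← h.2]
    · simp only [pvPartition, if_neg hx, Option.map_eq_some_iff] at h
      obtain ⟨⟨p1, p2⟩, hp, hpa⟩ := h
      have := ih (a := p1) (b := p2) (by simpa using hp)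
      have hb : b = p2 := by
        have := congrArg Prod.snd hpa; simpa using this.symm
      subst hb
      simp
      omega

theorem pvPartition_none_iff (s : List Char) (c : Char) :
    pvPartition s c = none ↔ c ∉ s := by
  induction s with
  | nil => simp [pvPartition]
  | cons x xs ih =>
    by_cases hx : x = c <;> simp [pvPartition, hx, ih]
    exact fun _ h => hx h.symm

theorem pvPartition_some_eq {s : List Char} {c : Char} {a b : List Char}
    (h : pvPartition s c = some (a, b)) : s = a ++ c :: b ∧ c ∉ a := by
  induction s generalizing a b with
  | nil => simp [pvPartition] at h
  | cons x xs ih =>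
    by_cases hx : x = c
    · simp [pvPartition, hx] at h
      exact ⟨by simp [← h.1, ← h.2, hx], by simp [h.1]⟩
    · simp only [pvPartition, if_neg hx, Option.map_eq_some_iff] at h
      obtain ⟨⟨p1, p2⟩, hp, hpa⟩ := h
      obtain ⟨h1, h2⟩ := ih (a := p1) (b := p2) hp
      have ha : a = x :: p1 := by have := congrArg Prod.fst hpa; simpa using this.symm
      have hb : b = p2 := by have := congrArg Prod.snd hpa; simpa using this.symm
      subst ha; subst hb
      constructor
      · simp [h1]
      · simp [h2]
        exact fun h => hx h.symm

-- the value A's loop appends for one section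
def pvFmtOne (seg : List Char) : List Char :=
  match pvPartition seg ']' with
  | none => '[' :: seg
  | some (h, c) => '*' :: (h ++ '*' :: '\n' :: (PySem.Chars.strip c ++ ['\n']))

-- the sections after the first '[', each formatted
def pvLoop (rest : List Char) : List (List Char) :=
  match hp : pvPartition rest '[' with
  | none => [pvFmtOne rest]
  | some (seg, rest') => pvFmtOne seg :: pvLoop rest'
termination_by rest.length
decreasing_by exact pvPartition_some_length hp

-- proof-side characterisation of text.split("["): peel pieces with pvPartition
def mySplit (l : List Char) (c : Char) : List (List Char) :=
  match hp : pvPartition l c with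
  | none => [l]
  | some (a, b) => a :: mySplit b c
termination_by l.length
decreasing_by exact pvPartition_some_length hp

theorem mySplit_none {l : List Char} {c : Char} (h : pvPartition l c = none) :
    mySplit l c = [l] := by
  rw [mySplit]; split <;> simp_all

theorem mySplit_some {l : List Char} {c : Char} {a b : List Char}
    (h : pvPartition l c = some (a, b)) : mySplit l c = a :: mySplit b c := by
  rw [mySplit]; split <;> simp_all

theorem mySplit_ne_nil (l : List Char) (c : Char) : mySplit l c ≠ [] := by
  rw [mySplit]; split <;> simp

theorem splitOn_go_eq (c : Char) : ∀ (fuel : Nat) (l cur : List Char) (acc : List (List Char)),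
    l.length ≤ fuel →
    PySem.Chars.splitOn.go [c] fuel l cur acc =
      acc.reverse ++
        (match mySplit l c with
         | [] => []
         | p :: ps => (cur.reverse ++ p) :: ps) := by
  intro fuel
  induction fuel with
  | zero =>
    intro l cur acc h
    have : l = [] := by cases l <;> simp_all
    subst this
    simp [PySem.Chars.splitOn.go, mySplit, pvPartition]
  | succ f ih =>
    intro l cur acc h
    match l with
    | [] => simp [PySem.Chars.splitOn.go, mySplit, pvPartition]
    | ch :: rest =>
      by_cases hc : ch = c
      · subst hc
        rw [PySem.Chars.splitOn.go]
        simp only [List.isPrefixOf, BEq.rfl, Bool.true_and, if_true, List.length_cons,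
          List.length_nil, Nat.zero_add, List.drop_succ_cons, List.drop_zero]
        rw [ih rest [] (cur.reverse :: acc) (by simpa using h)]
        rw [mySplit_some (l := ch :: rest) (c := ch) (a := []) (b := rest) (by simp [pvPartition])]
        rcases hms : mySplit rest ch with _ | ⟨p, ps⟩
        · exact absurd hms (mySplit_ne_nil rest ch)
        · simp
      · rw [PySem.Chars.splitOn.go]
        simp only [List.isPrefixOf, Bool.and_eq_true, beq_iff_eq, List.isPrefixOf_nil_left, and_true]
        rw [if_neg (by simpa using Ne.symm hc)]
        rw [ih rest (ch :: cur) acc (by simpa using h)]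
        rcases hp : pvPartition rest c with _ | ⟨a, b⟩
        · have hms : mySplit rest c = [rest] := mySplit_none hp
          have hms2 : mySplit (ch :: rest) c = [ch :: rest] :=
            mySplit_none (by simp [pvPartition, hc, hp])
          simp [hms, hms2]
        · have hms : mySplit rest c = a :: mySplit b c := mySplit_some hp
          have hms2 : mySplit (ch :: rest) c = (ch :: a) :: mySplit b c :=
            mySplit_some (by simp [pvPartition, hc, hp])
          simp [hms, hms2]

theorem splitOn_eq_mySplit (s : List Char) (c : Char) :
    PySem.Chars.splitOn s [c] = mySplit s c := by
  rw [show PySem.Chars.splitOn s [c] = PySem.Chars.splitOn.go [c] (s.length + 1) s [] [] from rfl]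
  rw [splitOn_go_eq c (s.length + 1) s [] [] (by omega)]
  rcases h : mySplit s c with _ | ⟨p, ps⟩
  · exact absurd h (mySplit_ne_nil s c)
  · simp

theorem splitOnMax_go_zero (c : Char) : ∀ (fuel : Nat) (l : List Char) (acc : List (List Char)),
    PySem.Chars.splitOnMax.go [c] fuel 0 l [] acc = acc.reverse ++ [l] := by
  intro fuel l acc
  match fuel, l with
  | 0, l => rw [PySem.Chars.splitOnMax.go]; simp
  | f+1, [] => rw [PySem.Chars.splitOnMax.go] <;> simp
  | f+1, ch :: rest => rw [PySem.Chars.splitOnMax.go] <;> simp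

theorem splitOnMax_go_one (c : Char) : ∀ (fuel : Nat) (l cur : List Char) (acc : List (List Char)),
    l.length ≤ fuel →
    PySem.Chars.splitOnMax.go [c] fuel 1 l cur acc =
      acc.reverse ++
        (match pvPartition l c with
         | none => [cur.reverse ++ l]
         | some (a, b) => [cur.reverse ++ a, b]) := by
  intro fuel
  induction fuel with
  | zero =>
    intro l cur acc h
    have : l = [] := by cases l <;> simp_all
    subst this
    rw [PySem.Chars.splitOnMax.go]; simp [pvPartition]
  | succ f ih =>
    intro l cur acc h
    match l with
    | [] => rw [PySem.Chars.splitOnMax.go] <;> simp [pvPartition]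
    | ch :: rest =>
      by_cases hc : ch = c
      · subst hc
        rw [PySem.Chars.splitOnMax.go]
        simp only [List.isPrefixOf, BEq.rfl, Bool.true_and, if_true, List.length_cons,
          List.length_nil, Nat.zero_add, List.drop_succ_cons, List.drop_zero,
          one_ne_zero, if_false]
        rw [show (1 : Nat) - 1 = 0 from rfl]
        rw [splitOnMax_go_zero ch f rest (cur.reverse :: acc)]
        simp [pvPartition]
      · rw [PySem.Chars.splitOnMax.go]
        simp only [List.isPrefixOf, Bool.and_eq_true, beq_iff_eq, and_true, one_ne_zero, if_false]
        rw [if_neg (by simpa using Ne.symm hc)]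
        rw [ih rest (ch :: cur) acc (by simpa using h)]
        rcases hp : pvPartition rest c with _ | ⟨a, b⟩
        · simp [pvPartition, hc, hp]
        · simp [pvPartition, hc, hp]

theorem splitOnMax_one {sec : List Char} {c : Char} {a b : List Char}
    (h : pvPartition sec c = some (a, b)) :
    PySem.Chars.splitOnMax sec [c] 1 = [a, b] := by
  rw [PySem.Chars.splitOnMax]
  rw [if_neg (by norm_num)]
  rw [show ((1 : Int).toNat) = 1 from rfl]
  rw [splitOnMax_go_one c (sec.length + 1) sec [] [] (by omega)]
  simp [h]

-- A's per-section body computes exactly pvFmtOne, appended to the accumulator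
theorem pvA_fmt_eq (acc seg : List Char) : pvA_fmt acc seg = acc ++ pvFmtOne seg := by
  rcases hp : pvPartition seg ']' with _ | ⟨h, c⟩
  · have hni : ']' ∉ seg := (pvPartition_none_iff seg ']').mp hp
    have hfalse : PySem.Chars.isIn [']'] seg = false := by
      rw [PySem.Chars.isIn_eq_false_iff]
      simpa [List.singleton_infix_iff] using hni
    simp [pvA_fmt, pvFmtOne, hfalse, hp]
  · have hmem : ']' ∈ seg := by
      by_contra hn
      rw [← pvPartition_none_iff seg ']'] at hn
      simp [hn] at hp
    have htrue : PySem.Chars.isIn [']'] seg = true := by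
      rw [PySem.Chars.isIn_iff_infix]
      simpa [List.singleton_infix_iff] using hmem
    simp [pvA_fmt, pvFmtOne, htrue, hp, splitOnMax_one hp]

theorem pvLoop_none {rest : List Char} (h : pvPartition rest '[' = none) :
    pvLoop rest = [pvFmtOne rest] := by
  rw [pvLoop]; split <;> simp_all

theorem pvLoop_some {rest seg rest' : List Char} (h : pvPartition rest '[' = some (seg, rest')) :
    pvLoop rest = pvFmtOne seg :: pvLoop rest' := by
  rw [pvLoop]; split <;> simp_all

-- A's fold over the split pieces appends the flattened formatted sections
theorem foldl_fmt : ∀ (rest acc : List Char),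
    (mySplit rest '[').foldl pvA_fmt acc = acc ++ (pvLoop rest).flatten := by
  intro rest
  induction rest using pvLoop.induct with
  | case1 rest hp =>
    intro acc
    rw [mySplit_none hp, pvLoop_none hp]
    simp [pvA_fmt_eq]
  | case2 rest seg rest' hp ih =>
    intro acc
    rw [mySplit_some hp, pvLoop_some hp]
    simp only [List.foldl_cons, pvA_fmt_eq, ih]
    simp

-- ----- the state machine's behaviour on bracket-free stretches -----

theorem fold0 {s : List Char} (h : '[' ∉ s) (out buf : List Char) :
    s.foldl pvStep (out, 0, buf) = (out ++ s, 0, buf) := by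
  induction s generalizing out with
  | nil => simp
  | cons x xs ih =>
    have hx : x ≠ '[' := fun he => h (he ▸ List.mem_cons_self)
    simp only [List.foldl_cons]
    rw [show pvStep (out, 0, buf) x = (out ++ [x], 0, buf) by simp [pvStep, hx]]
    rw [ih (fun hm => h (List.mem_cons_of_mem _ hm))]
    simp

theorem fold1 {s : List Char} (h1 : '[' ∉ s) (h2 : ']' ∉ s) (out buf : List Char) :
    s.foldl pvStep (out, 1, buf) = (out, 1, buf ++ s) := by
  induction s generalizing buf with
  | nil => simp
  | cons x xs ih =>
    have hx1 : x ≠ '[' := fun he => h1 (he ▸ List.mem_cons_self)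
    have hx2 : x ≠ ']' := fun he => h2 (he ▸ List.mem_cons_self)
    simp only [List.foldl_cons]
    rw [show pvStep (out, 1, buf) x = (out, 1, buf ++ [x]) by simp [pvStep, hx1, hx2]]
    rw [ih (fun hm => h1 (List.mem_cons_of_mem _ hm)) (fun hm => h2 (List.mem_cons_of_mem _ hm))]
    simp

theorem fold2 {s : List Char} (h : '[' ∉ s) (out buf : List Char) :
    s.foldl pvStep (out, 2, buf) = (out, 2, buf ++ s) := by
  induction s generalizing buf with
  | nil => simp
  | cons x xs ih =>
    have hx : x ≠ '[' := fun he => h (he ▸ List.mem_cons_self)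
    simp only [List.foldl_cons]
    rw [show pvStep (out, 2, buf) x = (out, 2, buf ++ [x]) by simp [pvStep, hx]]
    rw [ih (fun hm => h (List.mem_cons_of_mem _ hm))]
    simp

-- processing one section from state 1 and flushing/continuing equals pvFmtOne
theorem fold1_seg {seg : List Char} (hnb : '[' ∉ seg) (out : List Char) :
    seg.foldl pvStep (out, 1, []) =
      match pvPartition seg ']' with
      | none => (out, 1, seg)
      | some (h, c) => (out ++ '*' :: h ++ ['*', '\n'], 2, c) := by
  rcases hp : pvPartition seg ']' with _ | ⟨h, c⟩
  · have := (pvPartition_none_iff seg ']').mp hp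
    simpa using fold1 hnb this out []
  · obtain ⟨heq, hnr⟩ := pvPartition_some_eq hp
    subst heq
    have hnb1 : '[' ∉ h := fun hm => hnb (by simp [hm])
    have hnb2 : '[' ∉ c := fun hm => hnb (by simp [hm])
    rw [List.foldl_append, fold1 hnb1 hnr out []]
    simp only [List.nil_append, List.foldl_cons]
    rw [show pvStep (out, 1, h) ']' = (out ++ '*' :: h ++ ['*', '\n'], 2, []) by
      simp [pvStep]]
    rw [fold2 hnb2]
    simp

-- the machine run from state 1 over the rest of the text, then flushed,
-- appends exactly the formatted sections
theorem finish_fold1 : ∀ (rest out : List Char),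
    pvFinish (rest.foldl pvStep (out, 1, [])) = out ++ (pvLoop rest).flatten := by
  intro rest
  induction rest using pvLoop.induct with
  | case1 rest hp =>
    intro out
    have hnb := (pvPartition_none_iff rest '[').mp hp
    rw [pvLoop_none hp, fold1_seg hnb out]
    rcases hq : pvPartition rest ']' with _ | ⟨h, c⟩
    · simp [pvFinish, pvFmtOne, hq]
    · simp [pvFinish, pvFmtOne, hq]
  | case2 rest seg rest' hp ih =>
    intro out
    obtain ⟨heq, hnb⟩ := pvPartition_some_eq hp
    subst heq
    rw [pvLoop_some (by simpa using hp)]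
    rw [List.foldl_append, fold1_seg hnb out]
    rcases hq : pvPartition seg ']' with _ | ⟨h, c⟩
    · simp only [List.foldl_cons]
      rw [show pvStep (out, 1, seg) '[' = (out ++ '[' :: seg, 1, []) by
        simp [pvStep]]
      rw [ih]
      simp [pvFmtOne, hq]
    · simp only [List.foldl_cons]
      rw [show pvStep (out ++ '*' :: h ++ ['*', '\n'], 2, c) '[' =
          ((out ++ '*' :: h ++ ['*', '\n']) ++ PySem.Chars.strip c ++ ['\n'], 1, []) by
        simp [pvStep]]
      rw [ih]
      simp [pvFmtOne, hq]

-- ===== VERDICT (by name: the statement is the Claim_ definition above) =====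
theorem format_telegram_markdown_py_spec : Claim_equal_format_telegram_markdown_py := by
  intro text _
  unfold Spec_format_telegram_markdown_py format_telegram_markdown_py format_telegram_markdown_py_alt
  rcases hp : pvPartition text.toList '[' with _ | ⟨head, rest⟩
  · have hni := (pvPartition_none_iff text.toList '[').mp hp
    have hfalse : PySem.Chars.isIn ['['] text.toList = false := by
      rw [PySem.Chars.isIn_eq_false_iff]
      simpa [List.singleton_infix_iff] using hni
    simp [splitOn_eq_mySplit, mySplit_none hp, hfalse]
  · obtain ⟨heq, hnb⟩ := pvPartition_some_eq hp
    have htrue : PySem.Chars.isIn ['['] text.toList = true := by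
      rw [PySem.Chars.isIn_iff_infix]
      rw [List.singleton_infix_iff]
      rw [heq]; simp
    rw [htrue]
    rw [splitOn_eq_mySplit, mySplit_some hp]
    have hlen : ¬ ((head :: mySplit rest '[').length ≤ 1) := by
      rcases hms : mySplit rest '[' with _ | ⟨p, ps⟩
      · exact absurd hms (mySplit_ne_nil rest '[')
      · simp
    rw [if_neg hlen]
    simp only [List.drop_succ_cons, List.drop_zero, List.headD_cons]
    rw [foldl_fmt rest head]
    rw [heq, List.foldl_append, fold0 hnb [] []]
    simp only [List.nil_append, List.foldl_cons]
    rw [show pvStep (head, 0, []) '[' = (head, 1, []) by simp [pvStep]]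
    rw [finish_fold1 rest head]
    simp
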